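-- pv_equiv track=rewrite | github.com/mgozdev/elt-tech-explore | patterns/python-dlt/nport-bronze/sec_api_source.py | generate_month_range
-- ===== SOURCE A (Python) =====
-- from typing import Iterator, Optional, List
--
-- def generate_month_range(start_year: int, start_month: int,
--                         end_year: int, end_month: int) -> List[tuple]:
--     """
--     Generate a list of (year, month) tuples for a date range.
--
--     Args:
--         start_year: Starting year
--         start_month: Starting month (1-12)
--         end_year: Ending year
--         end_month: Ending month (1-12)
--
--     Returns:
--         List of (year, month) tuples
--
--     Example:
--         >>> generate_month_range(2024, 10, 2024, 12)
--         [(2024, 10), (2024, 11), (2024, 12)]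
--     """
--     months = []
--
--     current_year = start_year
--     current_month = start_month
--
--     while (current_year < end_year) or (current_year == end_year and current_month <= end_month):
--         months.append((current_year, current_month))
--
--         # Increment month
--         current_month += 1
--         if current_month > 12:
--             current_month = 1
--             current_year += 1
--
--     return months
-- ===== SOURCE B (Python) =====
-- from typing import List
--
--
-- def generate_month_range(start_year: int, start_month: int,
--                          end_year: int, end_month: int) -> List[tuple]:
--     """Per-year enumeration: for each year the month bounds are computed
--     directly, so no running (year, month) state or carry is needed."""
--     return [
--         (year, month)
--         for year in range(start_year, end_year + 1)
--         for month in range(start_month if year == start_year else 1,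
--                            (end_month if year == end_year else 12) + 1)
--     ]
-- ===== Notes on version B (the rewrite author's own statement) =====
-- stated objective: idiomatic
-- what changed: Replaces the stateful while-loop with increment-and-carry by a nested comprehension over years, computing each year's month bounds directly (start_month in the first year, end_month in the last, else 1..12).
-- outside the precondition, e.g. on generate_month_range(2024, 13, 2024, 15): A returns [(2024, 13)], B returns [(2024, 13), (2024, 14), (2024, 15)]
import Mathlib
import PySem

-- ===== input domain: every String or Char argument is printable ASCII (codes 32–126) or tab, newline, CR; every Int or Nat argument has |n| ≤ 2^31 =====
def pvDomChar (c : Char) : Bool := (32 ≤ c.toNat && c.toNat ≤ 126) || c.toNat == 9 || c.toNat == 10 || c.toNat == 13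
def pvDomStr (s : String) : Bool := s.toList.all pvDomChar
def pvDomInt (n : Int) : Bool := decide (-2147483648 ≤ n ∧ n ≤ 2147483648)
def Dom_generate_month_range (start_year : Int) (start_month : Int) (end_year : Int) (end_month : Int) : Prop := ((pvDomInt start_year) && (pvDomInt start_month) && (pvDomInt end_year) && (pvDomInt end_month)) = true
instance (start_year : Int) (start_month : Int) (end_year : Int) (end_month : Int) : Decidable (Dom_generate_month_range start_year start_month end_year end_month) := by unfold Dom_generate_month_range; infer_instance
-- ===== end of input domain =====

-- B replaces A's stateful increment-and-carry while-loop by a per-year comprehension with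
-- directly computed month bounds (objective: idiomatic; return value only, no mutation involved).

-- ===== PORT A =====
-- Fuel bound for A's while-loop (each iteration strictly decreases it while the guard holds;
-- with this exact initial fuel the recursion below never exhausts, so it computes the loop exactly).
def pvFuel (end_year : Int) (current_year : Int) (current_month : Int) : Nat :=
  (13 * (end_year - current_year) + (14 - min current_month 13)).toNat

-- A's while-loop: emit (year, month), increment month, carry into the next year past 12.
def generateMonthLoop (fuel : Nat) (end_year : Int) (end_month : Int) (current_year : Int) (current_month : Int) : List (Int × Int) :=
  match fuel with
  | 0 => []
  | fuel + 1 =>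
    if current_year < end_year ∨ (current_year = end_year ∧ current_month ≤ end_month) then
      (current_year, current_month) ::
        (if current_month + 1 > 12 then
          generateMonthLoop fuel end_year end_month (current_year + 1) 1
        else
          generateMonthLoop fuel end_year end_month current_year (current_month + 1))
    else []

def generate_month_range (start_year : Int) (start_month : Int) (end_year : Int) (end_month : Int) : List (Int × Int) :=
  generateMonthLoop (pvFuel end_year start_year start_month) end_year end_month start_year start_month

-- ===== PORT B =====
def generate_month_range_alt (start_year : Int) (start_month : Int) (end_year : Int) (end_month : Int) : List (Int × Int) :=
  (PySem.List.pyRange start_year (end_year + 1) 1).flatMap (fun year =>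
    (PySem.List.pyRange (if year = start_year then start_month else 1)
        ((if year = end_year then end_month else 12) + 1) 1).map (fun month => (year, month)))

-- ===== PRECONDITION & SPEC =====
-- Pre_ excludes only inputs with a month above 12 that actually reach the loop body: such months
-- are outside the documented 1..12 month domain, and there A's carry normalisation (emitting one
-- bare out-of-range tuple, or stopping at month 12) and B's plain per-year ranges are two equally
-- unspecified readings of garbage input.
def Pre_generate_month_range (start_year : Int) (start_month : Int) (end_year : Int) (end_month : Int) : Prop :=
  (start_year < end_year ∨ (start_year = end_year ∧ start_month ≤ end_month)) →
    (start_month ≤ 12 ∧ end_month ≤ 12)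
instance (start_year : Int) (start_month : Int) (end_year : Int) (end_month : Int) : Decidable (Pre_generate_month_range start_year start_month end_year end_month) := by unfold Pre_generate_month_range; infer_instance

def pvWitness_generate_month_range : Int × Int × Int × Int := (2024, 10, 2024, 12)

def Spec_generate_month_range (start_year : Int) (start_month : Int) (end_year : Int) (end_month : Int) (out : List (Int × Int)) : Prop := out = generate_month_range_alt start_year start_month end_year end_month
instance (start_year : Int) (start_month : Int) (end_year : Int) (end_month : Int) (out : List (Int × Int)) : Decidable (Spec_generate_month_range start_year start_month end_year end_month out) := by unfold Spec_generate_month_range; infer_instance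

-- ===== CLAIM (what is proved, stated in full; the proofs are below) =====
def Claim_equal_generate_month_range : Prop := ∀ (start_year : Int) (start_month : Int) (end_year : Int) (end_month : Int), Dom_generate_month_range start_year start_month end_year end_month → Pre_generate_month_range start_year start_month end_year end_month → Spec_generate_month_range start_year start_month end_year end_month (generate_month_range start_year start_month end_year end_month)

-- ===== LEMMAS AND PROOFS =====

-- When the loop guard is false the loop returns [] whatever fuel is left.
theorem loop_nil (f : Nat) (ey em y m : Int)
    (h : ¬ (y < ey ∨ (y = ey ∧ m ≤ em))) : generateMonthLoop f ey em y m = [] := by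
  cases f with
  | zero => rfl
  | succ n => rw [generateMonthLoop, if_neg h]

-- Any fuel at least pvFuel computes the same value (the loop never exhausts sufficient fuel).
theorem loop_congr (ey em : Int) :
    ∀ f g : Nat, ∀ y m : Int, pvFuel ey y m ≤ f → pvFuel ey y m ≤ g →
      generateMonthLoop f ey em y m = generateMonthLoop g ey em y m := by
  intro f
  induction f with
  | zero =>
    intro g y m hf hg
    have h : ¬ (y < ey ∨ (y = ey ∧ m ≤ em)) := by unfold pvFuel at hf; omega
    rw [loop_nil 0 ey em y m h, loop_nil g ey em y m h]
  | succ n ih =>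
    intro g y m hf hg
    by_cases h : y < ey ∨ (y = ey ∧ m ≤ em)
    · have hg1 : g ≠ 0 := by unfold pvFuel at hg; omega
      obtain ⟨g', rfl⟩ := Nat.exists_eq_succ_of_ne_zero hg1
      rw [generateMonthLoop, generateMonthLoop, if_pos h, if_pos h]
      by_cases h12 : m + 1 > 12
      · rw [if_pos h12, if_pos h12,
          ih g' (y + 1) 1 (by unfold pvFuel at *; omega) (by unfold pvFuel at *; omega)]
      · rw [if_neg h12, if_neg h12,
          ih g' y (m + 1) (by unfold pvFuel at *; omega) (by unfold pvFuel at *; omega)]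
    · rw [loop_nil _ ey em y m h, loop_nil _ ey em y m h]

-- In the final year (y = ey, em ≤ 12) the loop emits exactly the months m..em of that year.
theorem loop_last_year (ey em : Int) (hem : em ≤ 12) :
    ∀ m : Int, ∀ f : Nat, pvFuel ey ey m ≤ f →
      generateMonthLoop f ey em ey m =
        (PySem.List.pyRange m (em + 1) 1).map (fun month => (ey, month)) := by
  intro m
  generalize hk : (em + 1 - m).toNat = k
  induction k generalizing m with
  | zero =>
    intro f hf
    rw [PySem.List.pyRange_one_eq_nil (by omega), List.map_nil,
      loop_nil f ey em ey m (by omega)]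
  | succ n ih =>
    intro f hf
    have hm : m ≤ em := by omega
    have hf1 : f ≠ 0 := by unfold pvFuel at hf; omega
    obtain ⟨f', rfl⟩ := Nat.exists_eq_succ_of_ne_zero hf1
    rw [generateMonthLoop, if_pos (by omega), PySem.List.pyRange_one_cons (by omega)]
    simp only [List.map_cons, List.cons.injEq, true_and]
    by_cases h12 : m + 1 > 12
    · -- m = 12 = em: the carry lands past the end year, both sides are empty
      rw [if_pos h12, loop_nil f' ey em (ey + 1) 1 (by omega),
        PySem.List.pyRange_one_eq_nil (by omega), List.map_nil]
    · rw [if_neg h12, ih (m + 1) (by omega) f' (by unfold pvFuel at *; omega)]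

-- In a non-final year (y < ey), starting at m ≤ 12 the loop emits months m..12 of year y
-- and then continues from (y+1, 1).
theorem loop_mid_year (ey em : Int) :
    ∀ m : Int, ∀ f : Nat, ∀ y : Int, y < ey → m ≤ 12 → pvFuel ey y m ≤ f →
      generateMonthLoop f ey em y m =
        ((PySem.List.pyRange m 13 1).map (fun month => (y, month))) ++
          generateMonthLoop (pvFuel ey (y + 1) 1) ey em (y + 1) 1 := by
  intro m
  generalize hk : (13 - m).toNat = k
  induction k generalizing m with
  | zero => intro f y hy hm; omega
  | succ n ih =>
    intro f y hy hm hf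
    have hf1 : f ≠ 0 := by unfold pvFuel at hf; omega
    obtain ⟨f', rfl⟩ := Nat.exists_eq_succ_of_ne_zero hf1
    rw [generateMonthLoop, if_pos (Or.inl hy), PySem.List.pyRange_one_cons (by omega)]
    simp only [List.map_cons, List.cons_append, List.cons.injEq, true_and]
    by_cases h12 : m + 1 > 12
    · rw [if_pos h12, PySem.List.pyRange_one_eq_nil (by omega), List.map_nil, List.nil_append,
        loop_congr ey em f' (pvFuel ey (y + 1) 1) (y + 1) 1 (by unfold pvFuel at *; omega) le_rfl]
    · rw [if_neg h12, ih (m + 1) (by omega) f' y hy (by omega) (by unfold pvFuel at *; omega)]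

-- The tail years (strictly after start_year) of the loop equal B's flatMap over those years.
theorem loop_tail_years (sy sm ey em : Int) (hem : em ≤ 12) :
    ∀ y : Int, sy ≤ y →
      generateMonthLoop (pvFuel ey (y + 1) 1) ey em (y + 1) 1 =
        (PySem.List.pyRange (y + 1) (ey + 1) 1).flatMap (fun year =>
          (PySem.List.pyRange (if year = sy then sm else 1)
              ((if year = ey then em else 12) + 1) 1).map (fun month => (year, month))) := by
  intro y
  generalize hk : (ey - y).toNat = k
  induction k generalizing y with
  | zero =>
    intro hsy
    rw [loop_nil _ ey em (y + 1) 1 (by omega), PySem.List.pyRange_one_eq_nil (by omega),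
      List.flatMap_nil]
  | succ n ih =>
    intro hsy
    have hlt : y + 1 ≤ ey := by omega
    rw [PySem.List.pyRange_one_cons (by omega), List.flatMap_cons,
      if_neg (show ¬ (y + 1 = sy) by omega)]
    rcases eq_or_lt_of_le hlt with heq | hlt'
    · rw [if_pos heq, heq, loop_last_year ey em hem 1 _ le_rfl,
        show PySem.List.pyRange (ey + 1) (ey + 1) 1 = [] from PySem.List.pyRange_one_eq_nil le_rfl,
        List.flatMap_nil, List.append_nil]
    · rw [if_neg (by omega), loop_mid_year ey em 1 _ (y + 1) hlt' (by omega) le_rfl,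
        ih (y + 1) (by omega) (by omega)]
      norm_num

-- ===== VERDICT (by name: the statement is the Claim_ definition above) =====
theorem generate_month_range_spec : Claim_equal_generate_month_range := by
  intro sy sm ey em _ hpre
  unfold Spec_generate_month_range generate_month_range generate_month_range_alt
  rcases lt_trichotomy sy ey with hlt | heq | hgt
  · obtain ⟨hsm, hem⟩ := hpre (Or.inl hlt)
    rw [PySem.List.pyRange_one_cons (by omega), List.flatMap_cons, if_pos rfl,
      if_neg (by omega), loop_mid_year ey em sm _ sy hlt hsm le_rfl,
      loop_tail_years sy sm ey em hem sy le_rfl]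
    norm_num
  · subst heq
    rw [PySem.List.pyRange_one_cons (by omega), PySem.List.pyRange_one_eq_nil (by omega),
      List.flatMap_cons, List.flatMap_nil, List.append_nil, if_pos rfl, if_pos rfl]
    by_cases hse : sm ≤ em
    · obtain ⟨hsm, hem⟩ := hpre (Or.inr ⟨rfl, hse⟩)
      exact loop_last_year sy em hem sm _ le_rfl
    · rw [loop_nil _ sy em sy sm (by omega), PySem.List.pyRange_one_eq_nil (by omega),
        List.map_nil]
  · rw [loop_nil _ ey em sy sm (by omega), PySem.List.pyRange_one_eq_nil (by omega),
      List.flatMap_nil]
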